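-- pv_equiv track=rewrite | github.com/yena2bell/net_analyzer | topology_analysis/feedback_analysis.py | find_all_downstream_from_seed
-- ===== SOURCE A (Python) =====
-- def find_all_downstream_from_seed(lt_links, s_seed, ls_ends=[], b_downstream_ended_only_ls_ends=False):
--     """this function find all possible downstream of s_seed.
--     downstreams calculation ends when there is no link to connect or it reachs the element of ls_ends.
--     ***caution!! lt_links should be acyclic or there is no feedback between s_seed and elements of ls_ends ***
--     lt_links is the list of tuples which contain link information of the network.
--     element of lt_links can have two form: (s_start_node1,s_end_node2) or(s_start_node1,'+',s_end_node2).
--     two forms can be contained simultaneously."""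
--     llt_downstreams = []
--     dic_s_start_l_links = {}
--     for t_link in lt_links:
--         dic_s_start_l_links.setdefault(t_link[0],[]).append(t_link)
--
--     llt_stack = []
--     for t_link in dic_s_start_l_links[s_seed]:
--         llt_stack.append([t_link])
--
--     while llt_stack:
--         lt_downstream = llt_stack.pop()
--         if lt_downstream[-1][-1] in ls_ends:
--             llt_downstreams.append(lt_downstream)
--             continue
--         if lt_downstream[-1][-1] not in dic_s_start_l_links.keys():
--             if b_downstream_ended_only_ls_ends:
--                 continue
--             else:
--                 llt_downstreams.append(lt_downstream)
--                 continue
--         for t_link in dic_s_start_l_links[lt_downstream[-1][-1]]: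
--             llt_stack.append(lt_downstream+[t_link])
--
--     return llt_downstreams
-- ===== SOURCE B (Python) =====
-- def find_all_downstream_from_seed(lt_links, s_seed, ls_ends=[], b_downstream_ended_only_ls_ends=False):
--     """Recursive-DFS re-implementation: same start-node index, but paths are
--     enumerated by a recursive helper instead of an explicit worklist; children
--     and seed links are visited in reversed order, which yields the stack
--     version's pop (LIFO) emission order."""
--     dic_s_start_l_links = {}
--     for t_link in lt_links:
--         dic_s_start_l_links.setdefault(t_link[0], []).append(t_link)
--     llt_downstreams = []
--
--     def rec(lt_downstream):
--         s_node = lt_downstream[-1][-1]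
--         if s_node in ls_ends:
--             llt_downstreams.append(lt_downstream)
--         elif s_node not in dic_s_start_l_links:
--             if not b_downstream_ended_only_ls_ends:
--                 llt_downstreams.append(lt_downstream)
--         else:
--             for t_link in reversed(dic_s_start_l_links[s_node]):
--                 rec(lt_downstream + [t_link])
--
--     for t_link in reversed(dic_s_start_l_links[s_seed]):
--         rec([t_link])
--     return llt_downstreams
-- ===== Notes on version B (the rewrite author's own statement) =====
-- stated objective: alternative
-- what changed: Replaces A's explicit LIFO worklist (while-loop popping paths off a stack) by a recursive DFS helper that extends the current path and recurses over each node's links in reversed order, emitting finished paths directly.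
import Mathlib
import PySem

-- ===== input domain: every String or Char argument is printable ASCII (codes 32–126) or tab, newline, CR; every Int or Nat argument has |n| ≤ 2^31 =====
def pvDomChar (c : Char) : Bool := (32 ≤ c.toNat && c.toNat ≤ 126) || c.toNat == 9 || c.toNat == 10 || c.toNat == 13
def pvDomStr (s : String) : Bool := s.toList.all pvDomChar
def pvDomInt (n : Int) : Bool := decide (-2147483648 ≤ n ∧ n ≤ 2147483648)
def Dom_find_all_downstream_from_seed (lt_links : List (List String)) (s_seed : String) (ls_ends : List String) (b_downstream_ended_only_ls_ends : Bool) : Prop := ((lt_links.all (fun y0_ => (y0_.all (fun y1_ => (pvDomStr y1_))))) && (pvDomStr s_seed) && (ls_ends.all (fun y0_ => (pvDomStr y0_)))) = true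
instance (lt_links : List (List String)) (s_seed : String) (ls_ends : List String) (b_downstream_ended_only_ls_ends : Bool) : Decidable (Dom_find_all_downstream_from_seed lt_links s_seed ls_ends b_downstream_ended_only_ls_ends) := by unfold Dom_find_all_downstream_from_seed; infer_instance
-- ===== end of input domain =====

-- ===== PORT A =====
-- B replaces A's explicit LIFO worklist by a recursive DFS helper (children and seed
-- links iterated in reversed order), same return value; objective: alternative decomposition.
-- Shared data preparation (both Pythons build the same start-node -> links dict the same way):
def mkDict (lt_links : List (List String)) : PySem.Dict String (List (List String)) :=
  lt_links.foldl (fun d l => d.insert (l.headD "") (d.getD (l.headD "") [] ++ [l])) PySem.Dict.empty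

-- lt_downstream[-1][-1]: last element of the last link of a (always nonempty) path
def endNode (p : List (List String)) : String := (p.getLastD []).getLastD ""

-- fuel bound for the while-loop; under Pre_ (acyclicity) it exceeds the number of iterations
def pvFuel (lt_links : List (List String)) : Nat := (lt_links.length + 2) ^ (2 * lt_links.length + 4)

-- the 'while llt_stack:' loop of A, fuel-recursion (fuel is only a totality device)
def loopA (dic : PySem.Dict String (List (List String))) (ls_ends : List String) (flag : Bool) :
    Nat → List (List (List String)) → List (List (List String)) → List (List (List String))
  | 0, _, acc => acc
  | f + 1, stack, acc =>
    match stack.getLast? with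
    | none => acc
    | some p =>
      let rest := stack.dropLast
      let e := endNode p
      if ls_ends.contains e then loopA dic ls_ends flag f rest (acc ++ [p])
      else
        match dic.get? e with
        | none =>
          if flag then loopA dic ls_ends flag f rest acc
          else loopA dic ls_ends flag f rest (acc ++ [p])
        | some children =>
          loopA dic ls_ends flag f (children.foldl (fun st c => st ++ [p ++ [c]]) rest) acc

def find_all_downstream_from_seed (lt_links : List (List String)) (s_seed : String) (ls_ends : List String) (b_downstream_ended_only_ls_ends : Bool) : List (List (List String)) :=
  let dic := mkDict lt_links
  -- dic[s_seed] raises KeyError when s_seed is not a key: excluded by Pre_ (getD default unused there)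
  let stack := (dic.getD s_seed []).foldl (fun st t => st ++ [[t]]) []
  loopA dic ls_ends b_downstream_ended_only_ls_ends (pvFuel lt_links) stack []

-- ===== PORT B =====
-- recB = B's recursive helper rec; recList = its 'for t_link in reversed(...): rec(...)' loop.
-- Fuel is threaded sequentially through the calls (one unit per rec entry) purely as a
-- totality device; the {n // n ≤ f} bound is only what the termination proof needs.
mutual
def recB (dic : PySem.Dict String (List (List String))) (ls_ends : List String) (flag : Bool) :
    (f : Nat) → List (List String) → List (List (List String)) →
    List (List (List String)) × {n : Nat // n ≤ f}
  | 0, _, acc => (acc, ⟨0, Nat.le_refl 0⟩)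
  | f + 1, path, acc =>
    let e := endNode path
    if ls_ends.contains e then (acc ++ [path], ⟨f, Nat.le_succ f⟩)
    else
      match dic.get? e with
      | none => ((if flag then acc else acc ++ [path]), ⟨f, Nat.le_succ f⟩)
      | some children =>
        let r := recList dic ls_ends flag f (children.reverse.map (fun c => path ++ [c])) acc
        (r.1, ⟨r.2.1, Nat.le_succ_of_le r.2.2⟩)
termination_by f _ _ => (f, 0)
decreasing_by exact Prod.Lex.left _ _ (Nat.lt_succ_self f)

def recList (dic : PySem.Dict String (List (List String))) (ls_ends : List String) (flag : Bool) :
    (f : Nat) → List (List (List String)) → List (List (List String)) →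
    List (List (List String)) × {n : Nat // n ≤ f}
  | f, [], acc => (acc, ⟨f, Nat.le_refl f⟩)
  | f, p :: ps, acc =>
    let r1 := recB dic ls_ends flag f p acc
    let r2 := recList dic ls_ends flag r1.2.1 ps r1.1
    (r2.1, ⟨r2.2.1, Nat.le_trans r2.2.2 r1.2.2⟩)
termination_by f ps _ => (f, ps.length + 1)
decreasing_by
  · exact Prod.Lex.right _ (by simp)
  · rcases Nat.lt_or_ge r1.2.1 f with h | h
    · exact Prod.Lex.left _ _ h
    · have hq : r1.2.1 = f := Nat.le_antisymm r1.2.2 h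
      rw [hq]
      exact Prod.Lex.right _ (by simp)
end

def find_all_downstream_from_seed_alt (lt_links : List (List String)) (s_seed : String) (ls_ends : List String) (b_downstream_ended_only_ls_ends : Bool) : List (List (List String)) :=
  let dic := mkDict lt_links
  (recList dic ls_ends b_downstream_ended_only_ls_ends (pvFuel lt_links)
    ((dic.getD s_seed []).reverse.map (fun t => [t])) []).1

-- ===== PRECONDITION & SPEC =====
-- edge (start, end) extracted from a link (links are nonempty under Pre_, so the defaults are unused)
def pvEdges (lt_links : List (List String)) : List (String × String) :=
  lt_links.map (fun l => (l.headD "", l.getLastD ""))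
-- one expansion step: follow edges whose source is already reached and is not a stop node
def pvStepNE (lt_links : List (List String)) (ls_ends : List String) (xs : List String) : List String :=
  (xs ++ (pvEdges lt_links).filterMap
    (fun e => if e.1 ∈ xs ∧ e.1 ∉ ls_ends then some e.2 else none)).dedup
-- saturated closure (lt_links.length iterations reach every node at finite distance)
def pvReachNE (lt_links : List (List String)) (ls_ends : List String) (xs : List String) : List String :=
  (pvStepNE lt_links ls_ends)^[lt_links.length] xs
-- nodes A's traversal can reach: one unconditional step from the seed, then non-end expansion
def pvSeedReach (lt_links : List (List String)) (ls_ends : List String) (s_seed : String) : List String :=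
  pvReachNE lt_links ls_ends
    (((pvEdges lt_links).filterMap (fun e => if e.1 = s_seed then some e.2 else none)).dedup)

-- Pre_ excludes exactly the inputs on which the Python A does not return: a link that is the
-- empty list (t_link[0] raises IndexError), a seed that is no link's start node (dic[s_seed]
-- raises KeyError), and graphs where some traversed node lies on a cycle of non-ls_ends nodes,
-- on which A's while-loop never terminates.
def Pre_find_all_downstream_from_seed (lt_links : List (List String)) (s_seed : String) (ls_ends : List String) (b_downstream_ended_only_ls_ends : Bool) : Prop :=
  (∀ l ∈ lt_links, l ≠ []) ∧
  (∃ l ∈ lt_links, l.headD "" = s_seed) ∧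
  (∀ e ∈ pvEdges lt_links,
    e.1 ∈ pvSeedReach lt_links ls_ends s_seed → e.1 ∉ ls_ends →
    e.1 ∉ pvReachNE lt_links ls_ends [e.2])
instance (lt_links : List (List String)) (s_seed : String) (ls_ends : List String) (b_downstream_ended_only_ls_ends : Bool) : Decidable (Pre_find_all_downstream_from_seed lt_links s_seed ls_ends b_downstream_ended_only_ls_ends) := by unfold Pre_find_all_downstream_from_seed; infer_instance

def pvWitness_find_all_downstream_from_seed : List (List String) × String × List String × Bool :=
  ([["a", "b"], ["b", "+", "c"]], "a", ["c"], false)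

def Spec_find_all_downstream_from_seed (lt_links : List (List String)) (s_seed : String) (ls_ends : List String) (b_downstream_ended_only_ls_ends : Bool) (out : List (List (List String))) : Prop := out = find_all_downstream_from_seed_alt lt_links s_seed ls_ends b_downstream_ended_only_ls_ends
instance (lt_links : List (List String)) (s_seed : String) (ls_ends : List String) (b_downstream_ended_only_ls_ends : Bool) (out : List (List (List String))) : Decidable (Spec_find_all_downstream_from_seed lt_links s_seed ls_ends b_downstream_ended_only_ls_ends out) := by unfold Spec_find_all_downstream_from_seed; infer_instance

-- ===== CLAIM (what is proved, stated in full; the proofs are below) =====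
def Claim_equal_find_all_downstream_from_seed : Prop := ∀ (lt_links : List (List String)) (s_seed : String) (ls_ends : List String) (b_downstream_ended_only_ls_ends : Bool), Dom_find_all_downstream_from_seed lt_links s_seed ls_ends b_downstream_ended_only_ls_ends → Pre_find_all_downstream_from_seed lt_links s_seed ls_ends b_downstream_ended_only_ls_ends → Spec_find_all_downstream_from_seed lt_links s_seed ls_ends b_downstream_ended_only_ls_ends (find_all_downstream_from_seed lt_links s_seed ls_ends b_downstream_ended_only_ls_ends)

-- ===== LEMMAS AND PROOFS =====

-- unfolding equations for the fuel recursion, componentwise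
theorem recB_zero (dic : PySem.Dict String (List (List String))) (ls_ends : List String) (flag : Bool)
    (path : List (List String)) (acc : List (List (List String))) :
    recB dic ls_ends flag 0 path acc = (acc, ⟨0, Nat.le_refl 0⟩) := by
  rw [recB]

theorem recB_end_fst (dic : PySem.Dict String (List (List String))) (ls_ends : List String) (flag : Bool)
    (f : Nat) (path : List (List String)) (acc : List (List (List String)))
    (hend : ls_ends.contains (endNode path) = true) :
    (recB dic ls_ends flag (f + 1) path acc).1 = acc ++ [path] := by
  have h' : endNode path ∈ ls_ends := by simpa using hend
  rw [recB]; simp [h']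

theorem recB_end_fuel (dic : PySem.Dict String (List (List String))) (ls_ends : List String) (flag : Bool)
    (f : Nat) (path : List (List String)) (acc : List (List (List String)))
    (hend : ls_ends.contains (endNode path) = true) :
    (recB dic ls_ends flag (f + 1) path acc).2.1 = f := by
  have h' : endNode path ∈ ls_ends := by simpa using hend
  rw [recB]; simp [h']

theorem recB_dead_fst (dic : PySem.Dict String (List (List String))) (ls_ends : List String) (flag : Bool)
    (f : Nat) (path : List (List String)) (acc : List (List (List String)))
    (hend : ls_ends.contains (endNode path) = false)
    (hget : dic.get? (endNode path) = none) :
    (recB dic ls_ends flag (f + 1) path acc).1 = (if flag then acc else acc ++ [path]) := by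
  have h' : ¬ endNode path ∈ ls_ends := by simpa using hend
  rw [recB]; simp [h', hget]

theorem recB_dead_fuel (dic : PySem.Dict String (List (List String))) (ls_ends : List String) (flag : Bool)
    (f : Nat) (path : List (List String)) (acc : List (List (List String)))
    (hend : ls_ends.contains (endNode path) = false)
    (hget : dic.get? (endNode path) = none) :
    (recB dic ls_ends flag (f + 1) path acc).2.1 = f := by
  have h' : ¬ endNode path ∈ ls_ends := by simpa using hend
  rw [recB]; simp [h', hget]

theorem recB_kids_fst (dic : PySem.Dict String (List (List String))) (ls_ends : List String) (flag : Bool)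
    (f : Nat) (path : List (List String)) (acc : List (List (List String)))
    (children : List (List String))
    (hend : ls_ends.contains (endNode path) = false)
    (hget : dic.get? (endNode path) = some children) :
    (recB dic ls_ends flag (f + 1) path acc).1 =
      (recList dic ls_ends flag f (children.reverse.map (fun c => path ++ [c])) acc).1 := by
  have h' : ¬ endNode path ∈ ls_ends := by simpa using hend
  rw [recB]; simp [h', hget]

theorem recB_kids_fuel (dic : PySem.Dict String (List (List String))) (ls_ends : List String) (flag : Bool)
    (f : Nat) (path : List (List String)) (acc : List (List (List String)))
    (children : List (List String))
    (hend : ls_ends.contains (endNode path) = false)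
    (hget : dic.get? (endNode path) = some children) :
    (recB dic ls_ends flag (f + 1) path acc).2.1 =
      (recList dic ls_ends flag f (children.reverse.map (fun c => path ++ [c])) acc).2.1 := by
  have h' : ¬ endNode path ∈ ls_ends := by simpa using hend
  rw [recB]; simp [h', hget]

theorem recList_nil (dic : PySem.Dict String (List (List String))) (ls_ends : List String) (flag : Bool)
    (f : Nat) (acc : List (List (List String))) :
    recList dic ls_ends flag f [] acc = (acc, ⟨f, Nat.le_refl f⟩) := by
  rw [recList]

theorem recList_cons_fst (dic : PySem.Dict String (List (List String))) (ls_ends : List String) (flag : Bool)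
    (f : Nat) (p : List (List String)) (ps acc : List (List (List String))) :
    (recList dic ls_ends flag f (p :: ps) acc).1 =
      (recList dic ls_ends flag (recB dic ls_ends flag f p acc).2.1 ps
        (recB dic ls_ends flag f p acc).1).1 := by
  rw [recList]

theorem recList_cons_fuel (dic : PySem.Dict String (List (List String))) (ls_ends : List String) (flag : Bool)
    (f : Nat) (p : List (List String)) (ps acc : List (List (List String))) :
    (recList dic ls_ends flag f (p :: ps) acc).2.1 =
      (recList dic ls_ends flag (recB dic ls_ends flag f p acc).2.1 ps
        (recB dic ls_ends flag f p acc).1).2.1 := by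
  rw [recList]

-- pushing elements one by one onto a worklist is an append (A's two append loops)
theorem foldl_push_children (p : List (List String)) :
    ∀ (xs : List (List String)) (st : List (List (List String))),
      xs.foldl (fun st c => st ++ [p ++ [c]]) st = st ++ xs.map (fun c => p ++ [c]) := by
  intro xs
  induction xs with
  | nil => intro st; simp
  | cons x xs ih => intro st; simp [List.foldl, ih]

theorem foldl_push_seeds :
    ∀ (xs : List (List String)) (st : List (List (List String))),
      xs.foldl (fun st t => st ++ [[t]]) st = st ++ xs.map (fun t => [t]) := by
  intro xs
  induction xs with
  | nil => intro st; simp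
  | cons x xs ih => intro st; simp [List.foldl, ih]

-- with no fuel the recursion emits nothing and keeps no fuel
theorem recList_zero (dic : PySem.Dict String (List (List String))) (ls_ends : List String) (flag : Bool) :
    ∀ (ps acc : List (List (List String))),
      (recList dic ls_ends flag 0 ps acc).1 = acc ∧
      (recList dic ls_ends flag 0 ps acc).2.1 = 0 := by
  intro ps
  induction ps with
  | nil => intro acc; simp [recList_nil]
  | cons p ps ih =>
    intro acc
    rw [recList_cons_fst, recList_cons_fuel, recB_zero]
    exact ih acc

-- sequential recursion over an appended worklist threads accumulator and fuel
theorem recList_append (dic : PySem.Dict String (List (List String))) (ls_ends : List String) (flag : Bool) :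
    ∀ (xs ys acc : List (List (List String))) (f : Nat),
      (recList dic ls_ends flag f (xs ++ ys) acc).1 =
        (recList dic ls_ends flag (recList dic ls_ends flag f xs acc).2.1 ys
          (recList dic ls_ends flag f xs acc).1).1 := by
  intro xs
  induction xs with
  | nil => intro ys acc f; rw [List.nil_append, recList_nil]
  | cons x xs ih =>
    intro ys acc f
    rw [List.cons_append, recList_cons_fst, recList_cons_fst dic ls_ends flag f x xs acc,
      recList_cons_fuel dic ls_ends flag f x xs acc]
    exact ih ys _ _

-- MAIN INVARIANT: A's worklist loop over stack 'rev.reverse' (so pop order = rev order)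
-- computes exactly B's sequential recursion over 'rev'.
theorem loopA_eq_recList (dic : PySem.Dict String (List (List String))) (ls_ends : List String) (flag : Bool) :
    ∀ (f : Nat) (rev acc : List (List (List String))),
      loopA dic ls_ends flag f rev.reverse acc = (recList dic ls_ends flag f rev acc).1 := by
  intro f
  induction f with
  | zero => intro rev acc; exact (recList_zero dic ls_ends flag rev acc).1.symm
  | succ f ih =>
    intro rev acc
    cases rev with
    | nil => simp [loopA, recList_nil]
    | cons p rs =>
      have hst : (p :: rs).reverse = rs.reverse ++ [p] := by simp
      rw [hst, recList_cons_fst]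
      simp only [loopA, List.getLast?_concat, List.dropLast_concat]
      by_cases hend : ls_ends.contains (endNode p) = true
      · rw [if_pos hend, recB_end_fst dic ls_ends flag f p acc hend,
          recB_end_fuel dic ls_ends flag f p acc hend]
        exact ih rs (acc ++ [p])
      · rw [Bool.not_eq_true] at hend
        rw [if_neg (by simpa using hend)]
        cases hget : dic.get? (endNode p) with
        | none =>
          rw [recB_dead_fst dic ls_ends flag f p acc hend hget,
            recB_dead_fuel dic ls_ends flag f p acc hend hget]
          cases flag with
          | true => simpa using ih rs acc
          | false => simpa using ih rs (acc ++ [p])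
        | some children =>
          rw [recB_kids_fst dic ls_ends flag f p acc children hend hget,
            recB_kids_fuel dic ls_ends flag f p acc children hend hget]
          simp only
          rw [foldl_push_children]
          have hshape : rs.reverse ++ children.map (fun c => p ++ [c]) =
              (children.reverse.map (fun c => p ++ [c]) ++ rs).reverse := by
            simp
          rw [hshape, ih]
          exact recList_append dic ls_ends flag
            (children.reverse.map (fun c => p ++ [c])) rs acc f

-- ===== VERDICT (by name: the statement is the Claim_ definition above) =====
theorem find_all_downstream_from_seed_spec : Claim_equal_find_all_downstream_from_seed := by
  intro lt_links s_seed ls_ends flag _ _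
  unfold Spec_find_all_downstream_from_seed
  simp only [find_all_downstream_from_seed, find_all_downstream_from_seed_alt]
  rw [foldl_push_seeds]
  have h := loopA_eq_recList (mkDict lt_links) ls_ends flag (pvFuel lt_links)
    (((mkDict lt_links).getD s_seed []).reverse.map (fun t => [t])) []
  rw [← h]
  simp
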